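-- pv_equiv track=rewrite | github.com/Saif-AD/rag-segp-handbook | eval/run_ablation.py | make_chunks
-- ===== SOURCE A (Python) =====
-- from typing import Dict, Iterator, List, Optional, Tuple
--
-- def make_chunks(tokens: List[str], chunk_size: int, overlap: int) -> Iterator[List[str]]:
--     if chunk_size <= 0:
--         raise ValueError("chunk_size must be > 0")
--     if overlap < 0 or overlap >= chunk_size:
--         raise ValueError("overlap must be in [0, chunk_size-1]")
--     start = 0
--     n = len(tokens)
--     while start < n:
--         end = min(start + chunk_size, n)
--         yield tokens[start:end]
--         if end == n:
--             break
--         start = end - overlap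
-- ===== SOURCE B (Python) =====
-- def make_chunks(tokens, chunk_size, overlap):
--     if chunk_size <= 0:
--         raise ValueError("chunk_size must be > 0")
--     if overlap < 0 or overlap >= chunk_size:
--         raise ValueError("overlap must be in [0, chunk_size-1]")
--     # Streaming single pass: consume tokens one by one into a sliding buffer.
--     # When the buffer fills to chunk_size, emit it and keep its last `overlap`
--     # elements as the seed of the next chunk.  `fresh` records whether the
--     # buffer holds any not-yet-emitted token, so a trailing partial chunk is
--     # emitted exactly when new tokens arrived after the last full chunk.
--     buf = []
--     fresh = False
--     for t in tokens:
--         buf = buf + [t]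
--         fresh = True
--         if len(buf) == chunk_size:
--             yield buf
--             buf = buf[chunk_size - overlap:]
--             fresh = False
--     if fresh:
--         yield buf
-- ===== Notes on version B (the rewrite author's own statement) =====
-- stated objective: alternative
-- what changed: Replaces A's index-driven while loop that slices chunks out of the token list with a streaming single pass that never indexes tokens: each token is pushed into a sliding buffer, a full buffer is emitted and reseeded with its overlap tail, and a freshness flag decides whether a trailing partial chunk exists.
import Mathlib
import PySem

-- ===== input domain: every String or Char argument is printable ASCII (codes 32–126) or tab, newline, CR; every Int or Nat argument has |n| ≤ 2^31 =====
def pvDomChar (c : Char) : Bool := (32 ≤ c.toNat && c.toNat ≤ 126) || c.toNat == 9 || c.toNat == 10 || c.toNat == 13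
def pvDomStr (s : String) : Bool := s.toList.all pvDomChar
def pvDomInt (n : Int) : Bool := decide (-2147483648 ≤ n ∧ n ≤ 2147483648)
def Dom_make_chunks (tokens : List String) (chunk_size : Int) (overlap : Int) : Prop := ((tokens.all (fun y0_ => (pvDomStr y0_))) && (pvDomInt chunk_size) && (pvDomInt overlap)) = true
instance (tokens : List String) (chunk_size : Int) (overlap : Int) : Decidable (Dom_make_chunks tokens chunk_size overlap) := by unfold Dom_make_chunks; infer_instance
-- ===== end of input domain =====

-- B replaces A's index-driven while loop (slicing chunks out of the token list) by a streaming
-- single pass over the tokens with a sliding buffer and a freshness flag (objective: alternative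
-- decomposition). Equality is about the materialised sequence of yielded chunks.

-- ===== PORT A =====
-- while loop of A, ported with fuel tokens.length + 1 (the loop advances start by ≥ 1 each turn)
def make_chunks_aux (tokens : List String) (chunk_size : Int) (overlap : Int) (n : Int) (start : Int) : Nat → List (List String)
  | 0 => []
  | fuel + 1 =>
    if start < n then
      let e := min (start + chunk_size) n
      let chunk := PySem.List.slice tokens (some start) (some e)
      if e = n then [chunk]
      else chunk :: make_chunks_aux tokens chunk_size overlap n (e - overlap) fuel
    else []

def make_chunks (tokens : List String) (chunk_size : Int) (overlap : Int) : List (List String) :=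
  make_chunks_aux tokens chunk_size overlap (tokens.length : Int) 0 (tokens.length + 1)

-- ===== PORT B =====
-- the for-loop of Source B: state (buf, fresh), chunks emitted as they are produced
def make_chunks_alt_aux (chunk_size overlap : Int) : List String → List String → Bool → List (List String)
  | [], buf, fresh => if fresh then [buf] else []
  | t :: rest, buf, _ =>
    let buf' := buf ++ [t]
    if (buf'.length : Int) = chunk_size then
      buf' :: make_chunks_alt_aux chunk_size overlap rest
        (PySem.List.slice buf' (some (chunk_size - overlap)) none) false
    else
      make_chunks_alt_aux chunk_size overlap rest buf' true

def make_chunks_alt (tokens : List String) (chunk_size : Int) (overlap : Int) : List (List String) :=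
  make_chunks_alt_aux chunk_size overlap tokens [] false

-- ===== PRECONDITION & SPEC =====
-- Pre_ excludes exactly the inputs on which A raises ValueError (chunk_size ≤ 0 or overlap out of range)
def Pre_make_chunks (tokens : List String) (chunk_size : Int) (overlap : Int) : Prop :=
  0 < chunk_size ∧ 0 ≤ overlap ∧ overlap < chunk_size

instance (tokens : List String) (chunk_size : Int) (overlap : Int) : Decidable (Pre_make_chunks tokens chunk_size overlap) := by unfold Pre_make_chunks; infer_instance

def pvWitness_make_chunks : List String × Int × Int := (["a", "b", "c", "d", "e"], 3, 1)

def Spec_make_chunks (tokens : List String) (chunk_size : Int) (overlap : Int) (out : List (List String)) : Prop := out = make_chunks_alt tokens chunk_size overlap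
instance (tokens : List String) (chunk_size : Int) (overlap : Int) (out : List (List String)) : Decidable (Spec_make_chunks tokens chunk_size overlap out) := by unfold Spec_make_chunks; infer_instance

-- ===== CLAIM (what is proved, stated in full; the proofs are below) =====
def Claim_equal_make_chunks : Prop := ∀ (tokens : List String) (chunk_size : Int) (overlap : Int), Dom_make_chunks tokens chunk_size overlap → Pre_make_chunks tokens chunk_size overlap → Spec_make_chunks tokens chunk_size overlap (make_chunks tokens chunk_size overlap)

-- ===== LEMMAS AND PROOFS =====

-- Invariant: B at state (rest, buf, b) with buf = tokens[s : s + buf.length] produces exactly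
-- what A's loop produces from start s.
theorem pv_main (tokens : List String) (cs ov : Int) (hcs : 0 < cs) (hov : 0 ≤ ov) (hoc : ov < cs) :
    ∀ (rest buf : List String) (b : Bool) (s : Int) (fuel : Nat),
      0 ≤ s →
      tokens.drop s.toNat = buf ++ rest →
      (buf.length : Int) < cs →
      (b = false → rest ≠ [] ∨ buf = []) →
      (b = true → buf ≠ []) →
      rest.length + 1 ≤ fuel →
      make_chunks_alt_aux cs ov rest buf b
        = make_chunks_aux tokens cs ov (tokens.length : Int) s fuel := by
  intro rest
  induction rest with
  | nil =>
    intro buf b s fuel hs hdrop hblen hb0 hb1 hfuel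
    have hlen : tokens.length - s.toNat = buf.length := by
      have := congrArg List.length hdrop; simpa using this
    obtain ⟨fuel, rfl⟩ : ∃ f, fuel = f + 1 := ⟨fuel - 1, by omega⟩
    cases b with
    | false =>
      have hbuf : buf = [] := (hb0 rfl).resolve_left (by simp)
      subst hbuf
      have hns : ¬ s < (tokens.length : Int) := by simp only [List.length_nil] at hlen; omega
      simp [make_chunks_alt_aux, make_chunks_aux, hns]
    | true =>
      have hbne : buf ≠ [] := hb1 rfl
      have hbpos : 0 < buf.length := List.length_pos_iff.mpr hbne
      have hslt : s < (tokens.length : Int) := by omega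
      have hmin : min (s + cs) (tokens.length : Int) = (tokens.length : Int) := by omega
      have hchunk : PySem.List.slice tokens (some s) (some (tokens.length : Int)) = buf := by
        rw [PySem.List.slice_toNat tokens hs (by omega), hdrop, List.append_nil]
        exact List.take_of_length_le (by omega)
      rw [make_chunks_alt_aux, make_chunks_aux]
      simp only [hslt, if_pos, hmin]
      rw [hchunk]
  | cons t rest ih =>
    intro buf b s fuel hs hdrop hblen hb0 hb1 hfuel
    have hlen : tokens.length - s.toNat = buf.length + (rest.length + 1) := by
      have := congrArg List.length hdrop; simp at this; omega
    have hsub : s.toNat + (buf.length + (rest.length + 1)) ≤ tokens.length := by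
      have := List.length_drop (l := tokens) (i := s.toNat); omega
    have hfuel' : rest.length + 2 ≤ fuel := by simpa using hfuel
    obtain ⟨fuel, rfl⟩ : ∃ f, fuel = f + 1 := ⟨fuel - 1, by omega⟩
    have hslt : s < (tokens.length : Int) := by omega
    rw [make_chunks_alt_aux]
    by_cases hfull : ((buf ++ [t]).length : Int) = cs
    · -- buffer fills: B emits buf++[t]; A emits tokens[s : s+cs]
      have hbn : (buf.length : Int) + 1 = cs := by simpa using hfull
      rw [if_pos hfull]
      have hdrop' : tokens.drop s.toNat = (buf ++ [t]) ++ rest := by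
        rw [hdrop]; simp
      have hmin : min (s + cs) (tokens.length : Int) = s + cs := by omega
      rw [make_chunks_aux]
      simp only [hslt, if_pos, hmin]
      have hchunk : PySem.List.slice tokens (some s) (some (s + cs)) = buf ++ [t] := by
        rw [PySem.List.slice_toNat tokens hs (by omega), hdrop',
            show (s + cs).toNat - s.toNat = (buf ++ [t]).length by simp; omega,
            List.take_left]
      rw [hchunk]
      have hseed : PySem.List.slice (buf ++ [t]) (some (cs - ov)) none
          = (buf ++ [t]).drop (cs - ov).toNat := PySem.List.slice_from _ (by omega)
      have hseedlen : ((buf ++ [t]).drop (cs - ov).toNat).length = ov.toNat := by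
        simp [List.length_drop]; omega
      by_cases hend : s + cs = (tokens.length : Int)
      · -- last chunk ends exactly at the end: A breaks, B's recursive call sees rest = [] with fresh = false
        have hrest : rest = [] := by
          have : rest.length = 0 := by omega
          exact List.eq_nil_of_length_eq_zero this
        rw [if_pos hend, hrest, hseed, make_chunks_alt_aux]
        simp
      · rw [if_neg hend]
        rw [hseed]
        refine congrArg (List.cons (buf ++ [t]))
          (ih _ false (s + cs - ov) fuel (by omega) ?_ (by rw [hseedlen]; omega) ?_ (by simp) (by omega))
        · have h1 : (s + cs - ov).toNat = s.toNat + ((cs - ov).toNat) := by omega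
          rw [h1, ← List.drop_drop, hdrop', List.drop_append_of_le_length (by simp; omega)]
        · intro _
          left
          intro hr
          subst hr
          simp only [List.length_nil] at hlen
          exact hend (by omega)
    · -- buffer not yet full: B keeps accumulating, A's state is unchanged
      rw [if_neg hfull]
      refine ih (buf ++ [t]) true s (fuel + 1) hs (by rw [hdrop]; simp) ?_ (by simp) (by simp) (by omega)
      have : ((buf ++ [t]).length : Int) = (buf.length : Int) + 1 := by simp
      omega

-- ===== VERDICT (by name: the statement is the Claim_ definition above) =====
theorem make_chunks_spec : Claim_equal_make_chunks := by
  intro tokens cs ov _ hpre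
  obtain ⟨hcs, hov, hoc⟩ := hpre
  unfold Spec_make_chunks make_chunks make_chunks_alt
  exact (pv_main tokens cs ov hcs hov hoc tokens [] false 0 (tokens.length + 1)
    le_rfl (by simp) (by simpa using hcs) (fun _ => Or.inr rfl) (by simp) (by omega)).symm
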